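-- pv_equiv track=rewrite | github.com/jsownz/personal-dictionary | Mangler.py | full_number_swap
-- ===== SOURCE A (Python) =====
-- from itertools import product
--
-- def full_number_swap(term):
--     """
--         Author: th3xer0
--         Replace numeric chars within a string with common substitutions of
--         letters. Return all permutations.
--
--         :param term: numeric string
--         :type term: string
--         :return: all 'term' permutations w/ number substitutions
--         :rtype: list
--     """
--     number_alt_dict = {
--         '0': 'O',
--         '1': 'l',
--         '2': 'Z',
--         '3': 'E',
--         '4': 'A',
--         '5': 'S',
--         '6': 'bG',
--         '7': 'TL',
--         '8': 'B',
--         '9': 'gq'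
--     }
--     new_terms = []
--     for character in term:
--         alt_number = number_alt_dict.get(character, character)
--         new_terms.append([character, ] if alt_number == character else [
--             char for char in ",".join(character + alt_number).split(",")])
--     return [''.join(t) for t in product(*new_terms)]
-- ===== SOURCE B (Python) =====
-- def full_number_swap(term):
--     """Mixed-radix unranking: count the permutations, then decode each index
--     k in 0..total-1 into its output string by repeated divmod (last char
--     varies fastest), instead of building a cartesian product."""
--     subs = {
--         '0': 'O', '1': 'l', '2': 'Z', '3': 'E', '4': 'A',
--         '5': 'S', '6': 'bG', '7': 'TL', '8': 'B', '9': 'gq'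
--     }
--     opts = [ch + subs.get(ch, '') for ch in term]
--     total = 1
--     for o in opts:
--         total *= len(o)
--
--     def unrank(k):
--         chars = []
--         for o in reversed(opts):
--             k, d = divmod(k, len(o))
--             chars.append(o[d])
--         return ''.join(reversed(chars))
--
--     return [unrank(k) for k in range(total)]
-- ===== Notes on version B (the rewrite author's own statement) =====
-- stated objective: alternative
-- what changed: Replaces building the option table and enumerating its cartesian product with itertools.product by mixed-radix unranking: B computes the total count and decodes each index 0..total-1 into an output string by repeated divmod over the per-character radices.
import Mathlib
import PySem

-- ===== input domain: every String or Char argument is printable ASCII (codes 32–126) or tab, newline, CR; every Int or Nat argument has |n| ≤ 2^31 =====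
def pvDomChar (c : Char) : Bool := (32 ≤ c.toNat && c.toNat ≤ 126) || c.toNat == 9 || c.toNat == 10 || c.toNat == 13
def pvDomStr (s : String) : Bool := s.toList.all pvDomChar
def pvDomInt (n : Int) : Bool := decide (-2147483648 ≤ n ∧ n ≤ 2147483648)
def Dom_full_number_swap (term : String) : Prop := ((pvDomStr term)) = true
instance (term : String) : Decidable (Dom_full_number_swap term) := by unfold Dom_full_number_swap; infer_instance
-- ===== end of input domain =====

-- B replaces A's build-option-table + itertools.product pipeline by mixed-radix
-- unranking: count the outputs, then decode each index by repeated divmod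
-- (objective: alternative).

-- ===== PORT A =====
-- number_alt_dict of A; iteration over a Python str yields 1-char strings, hence Char keys
def pvNumberAltDict : PySem.Dict Char String :=
  PySem.Dict.ofList [('0', "O"), ('1', "l"), ('2', "Z"), ('3', "E"), ('4', "A"),
                     ('5', "S"), ('6', "bG"), ('7', "TL"), ('8', "B"), ('9', "gq")]

-- one iteration of A's loop body: the option list appended for `character`.
-- ",".join(character + alt_number).split(",") is exactly the list of the
-- 1-character strings of character + alt_number (exact: the joined string is split
-- back at every inserted ',').
def pvOptionsA (c : Char) : List String :=
  let cs : String := String.ofList [c]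
  let alt : String := PySem.Dict.getD pvNumberAltDict c cs
  if alt == cs then [cs]
  else (cs.toList ++ alt.toList).map (fun ch => String.ofList [ch])

-- itertools.product(*new_terms) (each tuple as a list, in product's odometer order)
def pvProductA : List (List String) → List (List String)
  | [] => [[]]
  | l :: ls => l.flatMap (fun x => (pvProductA ls).map (fun t => x :: t))

def full_number_swap (term : String) : List String :=
  let new_terms : List (List String) := term.toList.map pvOptionsA
  (pvProductA new_terms).map (fun t => PySem.Str.join "" t)

-- ===== PORT B =====
-- B's subs dict (same literal contents as A's)
def pvSubs : PySem.Dict Char String :=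
  PySem.Dict.ofList [('0', "O"), ('1', "l"), ('2', "Z"), ('3', "E"), ('4', "A"),
                     ('5', "S"), ('6', "bG"), ('7', "TL"), ('8', "B"), ('9', "gq")]

-- opts entry: ch + subs.get(ch, '')  (a Python string, as List Char)
def pvOptB (c : Char) : List Char := c :: (PySem.Dict.getD pvSubs c "").toList

-- one step of unrank's loop: k, d = divmod(k, len(o)); chars.append(o[d])
-- (o[d] is always in range since d = k % len(o) and len(o) ≥ 1; ported with getD)
def pvUnrankStep (p : Nat × List Char) (o : List Char) : Nat × List Char :=
  (p.1 / o.length, p.2 ++ [o.getD (p.1 % o.length) ' '])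

-- unrank(k): fold over reversed(opts), then ''.join(reversed(chars))
def pvUnrank (opts : List (List Char)) (k : Nat) : List Char :=
  ((opts.reverse.foldl pvUnrankStep (k, [])).2).reverse

def full_number_swap_alt (term : String) : List String :=
  let opts : List (List Char) := term.toList.map pvOptB
  let total : Nat := opts.foldl (fun t o => t * o.length) 1
  (List.range total).map (fun k => String.ofList (pvUnrank opts k))

-- ===== PRECONDITION & SPEC =====
def Spec_full_number_swap (term : String) (out : List String) : Prop := out = full_number_swap_alt term
instance (term : String) (out : List String) : Decidable (Spec_full_number_swap term out) := by unfold Spec_full_number_swap; infer_instance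

-- ===== CLAIM (what is proved, stated in full; the proofs are below) =====
def Claim_equal_full_number_swap : Prop := ∀ (term : String), Dom_full_number_swap term → Spec_full_number_swap term (full_number_swap term)

-- ===== LEMMAS AND PROOFS =====

-- proof-side cartesian product over per-character option lists (odometer order)
def pvProd : List (List Char) → List (List Char)
  | [] => [[]]
  | o :: rest => o.flatMap (fun x => (pvProd rest).map (fun t => x :: t))

def pvTot (opts : List (List Char)) : Nat := (opts.map List.length).prod

-- ---- A side: full_number_swap term = (pvProd (opts)).map String.ofList ----

lemma join_nil_cons (a : List Char) (l : List (List Char)) :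
    PySem.Chars.join [] (a :: l) = a ++ PySem.Chars.join [] l := by
  cases l with
  | nil => simp [PySem.Chars.join_singleton, PySem.Chars.join_nil]
  | cons b m => simp [PySem.Chars.join_cons_cons]

-- the per-character option lists of the two ports coincide (at the List Char level)
lemma optionsA_toList (c : Char) :
    (pvOptionsA c).map String.toList = (pvOptB c).map (fun ch => [ch]) := by
  by_cases h0 : c = '0'; · subst h0; decide
  by_cases h1 : c = '1'; · subst h1; decide
  by_cases h2 : c = '2'; · subst h2; decide
  by_cases h3 : c = '3'; · subst h3; decide
  by_cases h4 : c = '4'; · subst h4; decide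
  by_cases h5 : c = '5'; · subst h5; decide
  by_cases h6 : c = '6'; · subst h6; decide
  by_cases h7 : c = '7'; · subst h7; decide
  by_cases h8 : c = '8'; · subst h8; decide
  by_cases h9 : c = '9'; · subst h9; decide
  have b0 : ('0' == c) = false := beq_eq_false_iff_ne.mpr (Ne.symm h0)
  have b1 : ('1' == c) = false := beq_eq_false_iff_ne.mpr (Ne.symm h1)
  have b2 : ('2' == c) = false := beq_eq_false_iff_ne.mpr (Ne.symm h2)
  have b3 : ('3' == c) = false := beq_eq_false_iff_ne.mpr (Ne.symm h3)
  have b4 : ('4' == c) = false := beq_eq_false_iff_ne.mpr (Ne.symm h4)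
  have b5 : ('5' == c) = false := beq_eq_false_iff_ne.mpr (Ne.symm h5)
  have b6 : ('6' == c) = false := beq_eq_false_iff_ne.mpr (Ne.symm h6)
  have b7 : ('7' == c) = false := beq_eq_false_iff_ne.mpr (Ne.symm h7)
  have b8 : ('8' == c) = false := beq_eq_false_iff_ne.mpr (Ne.symm h8)
  have b9 : ('9' == c) = false := beq_eq_false_iff_ne.mpr (Ne.symm h9)
  have hiA : pvNumberAltDict.items = [('0', "O"), ('1', "l"), ('2', "Z"), ('3', "E"), ('4', "A"),
      ('5', "S"), ('6', "bG"), ('7', "TL"), ('8', "B"), ('9', "gq")] := by decide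
  have hiB : pvSubs.items = [('0', "O"), ('1', "l"), ('2', "Z"), ('3', "E"), ('4', "A"),
      ('5', "S"), ('6', "bG"), ('7', "TL"), ('8', "B"), ('9', "gq")] := by decide
  simp [pvOptionsA, pvOptB, PySem.Dict.getD, PySem.Dict.get?, hiA, hiB, List.find?,
        b0, b1, b2, b3, b4, b5, b6, b7, b8, b9]

lemma productA_toList (cs : List Char) :
    (pvProductA (cs.map pvOptionsA)).map
        (fun t => (PySem.Str.join "" t).toList) = pvProd (cs.map pvOptB) := by
  induction cs with
  | nil => simp [pvProductA, pvProd, PySem.Str.toList_join, PySem.Chars.join_nil]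
  | cons c rest ih =>
      simp only [List.map_cons, pvProductA, List.map_flatMap, List.map_map]
      have hflat : ∀ (g : List Char → List (List Char)),
          (pvOptionsA c).flatMap (fun x => g x.toList)
            = (pvOptB c).flatMap (fun ch => g [ch]) := by
        intro g
        calc (pvOptionsA c).flatMap (fun x => g x.toList)
            = ((pvOptionsA c).map String.toList).flatMap g := by
              rw [List.flatMap_map]
          _ = ((pvOptB c).map (fun ch => [ch])).flatMap g := by rw [optionsA_toList]
          _ = (pvOptB c).flatMap (fun ch => g [ch]) := by rw [List.flatMap_map]
      have hbody : ∀ x : String,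
          (pvProductA (rest.map pvOptionsA)).map
              ((fun t => (PySem.Str.join "" t).toList) ∘ (fun t => x :: t))
            = (pvProd (rest.map pvOptB)).map (fun t => x.toList ++ t) := by
        intro x
        rw [← List.map_map, ← ih]
        simp only [List.map_map]
        refine List.map_congr_left (fun t _ => ?_)
        simp [Function.comp, PySem.Str.toList_join]
        exact join_nil_cons _ _
      refine Eq.trans (List.flatMap_congr fun x _ => hbody x) ?_
      rw [hflat (fun l => (pvProd (rest.map pvOptB)).map (fun t => l ++ t))]
      simp [pvProd]

-- ---- B side: the unranking enumeration equals pvProd ----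

lemma foldl_total (opts : List (List Char)) (a : Nat) :
    opts.foldl (fun t o => t * o.length) a = a * pvTot opts := by
  induction opts generalizing a with
  | nil => simp [pvTot]
  | cons o rest ih => rw [List.foldl_cons, ih]; simp [pvTot, List.prod_cons]; ring

lemma unrank_foldl_cons (o : List Char) (rest : List (List Char)) (k : Nat) :
    (o :: rest).reverse.foldl pvUnrankStep (k, [])
      = pvUnrankStep (rest.reverse.foldl pvUnrankStep (k, [])) o := by
  simp [List.foldl_append]

lemma unrank_fst (opts : List (List Char)) (k : Nat) :
    (opts.reverse.foldl pvUnrankStep (k, [])).1 = k / pvTot opts := by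
  induction opts generalizing k with
  | nil => simp [pvTot]
  | cons o rest ih =>
      rw [unrank_foldl_cons]
      simp only [pvUnrankStep, ih]
      rw [Nat.div_div_eq_div_mul]
      simp [pvTot, List.prod_cons, Nat.mul_comm]

lemma unrank_snd_mod (opts : List (List Char)) (k : Nat) :
    (opts.reverse.foldl pvUnrankStep (k, [])).2
      = (opts.reverse.foldl pvUnrankStep (k % pvTot opts, [])).2 := by
  induction opts generalizing k with
  | nil => simp
  | cons o rest ih =>
      rw [unrank_foldl_cons, unrank_foldl_cons]
      simp only [pvUnrankStep, unrank_fst]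
      have hT : pvTot (o :: rest) = pvTot rest * o.length := by
        simp [pvTot, List.prod_cons, Nat.mul_comm]
      have hmod : k % pvTot (o :: rest) % pvTot rest = k % pvTot rest := by
        rw [hT]; exact Nat.mod_mod_of_dvd k ⟨o.length, rfl⟩
      have hdiv : k % pvTot (o :: rest) / pvTot rest = k / pvTot rest % o.length := by
        rw [hT]; exact Nat.mod_mul_right_div_self k (pvTot rest) o.length
      rw [hdiv, Nat.mod_mod_of_dvd _ (dvd_refl _)]
      congr 1
      rw [ih k, ih (k % pvTot (o :: rest)), hmod]

lemma unrank_cons (o : List Char) (rest : List (List Char)) (q r : Nat)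
    (hr : r < pvTot rest) :
    pvUnrank (o :: rest) (q * pvTot rest + r)
      = o.getD (q % o.length) ' ' :: pvUnrank rest r := by
  have hb : 0 < pvTot rest := Nat.pos_of_ne_zero (by omega)
  unfold pvUnrank
  rw [unrank_foldl_cons]
  simp only [pvUnrankStep, unrank_fst]
  have hdiv : (q * pvTot rest + r) / pvTot rest = q := by
    rw [Nat.add_comm, Nat.mul_comm, Nat.add_mul_div_left _ _ hb, Nat.div_eq_of_lt hr]; omega
  have hmod : (q * pvTot rest + r) % pvTot rest = r := by
    rw [Nat.add_comm, Nat.add_mul_mod_self_right, Nat.mod_eq_of_lt hr]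
  rw [hdiv, List.reverse_append, List.reverse_singleton]
  rw [unrank_snd_mod rest (q * pvTot rest + r), hmod]
  rfl

lemma range_mul_map {α : Type} (a b : Nat) (f : Nat → α) :
    (List.range (a * b)).map f
      = (List.range a).flatMap (fun q => (List.range b).map (fun r => f (q * b + r))) := by
  induction a with
  | zero => simp
  | succ a ih =>
      have : (a + 1) * b = a * b + b := by ring
      rw [this, List.range_add, List.map_append, ih, List.range_succ, List.flatMap_append]
      simp [List.map_map, Function.comp]

lemma getD_range {α : Type} (l : List α) (d : α) :
    (List.range l.length).map (fun i => l.getD i d) = l := by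
  apply List.ext_getElem
  · simp
  · intro i h1 h2
    simp [List.getD_eq_getElem?_getD, List.getElem?_eq_getElem h2]

lemma tot_pos (opts : List (List Char)) (h : ∀ o ∈ opts, o ≠ []) : 0 < pvTot opts := by
  unfold pvTot
  apply List.prod_pos
  intro a ha
  simp only [List.mem_map] at ha
  obtain ⟨o, ho, rfl⟩ := ha
  exact List.length_pos_iff.mpr (h o ho)

lemma range_unrank (opts : List (List Char)) (h : ∀ o ∈ opts, o ≠ []) :
    (List.range (pvTot opts)).map (pvUnrank opts) = pvProd opts := by
  induction opts with
  | nil => simp [pvTot, pvProd, pvUnrank]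
  | cons o rest ih =>
      have hrest : ∀ x ∈ rest, x ≠ [] := fun x hx => h x (List.mem_cons_of_mem o hx)
      have hb : 0 < pvTot rest := tot_pos rest hrest
      have hT : pvTot (o :: rest) = o.length * pvTot rest := by
        simp [pvTot, List.prod_cons]
      rw [hT, range_mul_map]
      have hbody : ∀ q ∈ List.range o.length,
          (List.range (pvTot rest)).map (fun r => pvUnrank (o :: rest) (q * pvTot rest + r))
            = (pvProd rest).map (fun t => o.getD q ' ' :: t) := by
        intro q hq
        have hq' : q < o.length := List.mem_range.mp hq
        calc (List.range (pvTot rest)).map (fun r => pvUnrank (o :: rest) (q * pvTot rest + r))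
            = (List.range (pvTot rest)).map (fun r => o.getD (q % o.length) ' ' :: pvUnrank rest r) := by
              refine List.map_congr_left (fun r hr => ?_)
              exact unrank_cons o rest q r (List.mem_range.mp hr)
          _ = ((List.range (pvTot rest)).map (pvUnrank rest)).map
                (fun t => o.getD q ' ' :: t) := by
              rw [Nat.mod_eq_of_lt hq']; simp [List.map_map, Function.comp]
          _ = (pvProd rest).map (fun t => o.getD q ' ' :: t) := by rw [ih hrest]
      calc (List.range o.length).flatMap
            (fun q => (List.range (pvTot rest)).map (fun r => pvUnrank (o :: rest) (q * pvTot rest + r)))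
          = (List.range o.length).flatMap
            (fun q => (pvProd rest).map (fun t => o.getD q ' ' :: t)) :=
            List.flatMap_congr hbody
        _ = ((List.range o.length).map (fun q => o.getD q ' ')).flatMap
            (fun x => (pvProd rest).map (fun t => x :: t)) := by rw [List.flatMap_map]
        _ = pvProd (o :: rest) := by rw [getD_range]; rfl

-- ===== VERDICT (by name: the statement is the Claim_ definition above) =====
theorem full_number_swap_spec : Claim_equal_full_number_swap := by
  intro term _
  unfold Spec_full_number_swap full_number_swap full_number_swap_alt
  have hne : ∀ o ∈ term.toList.map pvOptB, o ≠ [] := by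
    intro o ho
    simp only [List.mem_map] at ho
    obtain ⟨c, _, rfl⟩ := ho
    simp [pvOptB]
  have hA : (pvProductA (term.toList.map pvOptionsA)).map (fun t => PySem.Str.join "" t)
      = ((pvProductA (term.toList.map pvOptionsA)).map
          (fun t => (PySem.Str.join "" t).toList)).map String.ofList := by
    simp only [List.map_map, Function.comp_def]
    refine List.map_congr_left (fun a _ => ?_)
    exact String.ofList_toList.symm
  simp only
  rw [hA, productA_toList, foldl_total, Nat.one_mul, ← range_unrank _ hne, List.map_map]
  simp [Function.comp_def]
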